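-- pv_equiv track=rewrite | github.com/nibuman/advent_of_code | python/2025/04_building_department/aoc202504.py | remove_accessible_rolls
-- ===== SOURCE A (Python) =====
-- from itertools import chain
--
-- def remove_accessible_rolls(data: list[str]) -> list[str]:
--     new_data = data.copy()
--     for r, row in enumerate(data):
--         for c, char in enumerate(row):
--             if char == ".":
--                 continue
--             rows = data[r - 1 if r >= 1 else 0 : r + 2]
--             window = [row[c - 1 if c >= 1 else 0 : c + 2] for row in rows]
--             if "".join(chain(window)).count("@") < 5:
--                 new_data[r] = f"{new_data[r][:c]}.{new_data[r][c + 1 :]}"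
--     return new_data
-- ===== SOURCE B (Python) =====
-- from itertools import accumulate
--
-- def remove_accessible_rolls(data: list[str]) -> list[str]:
--     # Per-row prefix sums of '@' counts; each cell's 3x3 window count is then
--     # three prefix-difference lookups instead of slicing and rescanning.
--     prefs = [list(accumulate((1 if ch == "@" else 0 for ch in row), initial=0))
--              for row in data]
--     n_rows = len(data)
--     result = []
--     for r, row in enumerate(data):
--         r0 = r - 1 if r >= 1 else 0
--         r1 = r + 2 if r + 2 < n_rows else n_rows
--         chars = []
--         for c, ch in enumerate(row):
--             if ch == ".":
--                 chars.append(ch)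
--                 continue
--             c0 = c - 1 if c >= 1 else 0
--             c1 = c + 2
--             cnt = 0
--             for i in range(r0, r1):
--                 p = prefs[i]
--                 m = len(p) - 1
--                 cnt += p[c1 if c1 < m else m] - p[c0 if c0 < m else m]
--             chars.append("." if cnt < 5 else ch)
--         result.append("".join(chars))
--     return result
-- ===== Notes on version B (the rewrite author's own statement) =====
-- stated objective: alternative
-- what changed: Replaces A's per-cell window slicing (row slices, join, substring count) and its copy-then-mutate string surgery by per-row '@' prefix sums consulted via three prefix-difference lookups per cell, building each output row functionally in one pass.
import Mathlib
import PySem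

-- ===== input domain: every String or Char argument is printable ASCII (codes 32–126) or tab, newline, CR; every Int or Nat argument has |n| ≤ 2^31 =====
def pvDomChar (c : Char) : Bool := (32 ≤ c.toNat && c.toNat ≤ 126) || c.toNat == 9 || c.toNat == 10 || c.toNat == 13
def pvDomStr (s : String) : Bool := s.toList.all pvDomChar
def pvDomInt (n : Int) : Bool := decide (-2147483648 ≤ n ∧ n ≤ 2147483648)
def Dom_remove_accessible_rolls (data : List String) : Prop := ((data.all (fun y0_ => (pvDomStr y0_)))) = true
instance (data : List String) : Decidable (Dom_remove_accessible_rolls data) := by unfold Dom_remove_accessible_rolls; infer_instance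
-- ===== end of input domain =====

-- B replaces A's per-cell window slicing/joining/counting and in-place string surgery by
-- per-row '@' prefix sums consulted via three prefix-difference lookups, building each
-- output row functionally in one pass (measured constant-factor speedup; same O(R*C) asymptotics).

-- ===== PORT A =====
def remove_accessible_rolls (data : List String) : List String :=
  (PySem.List.enumerate data 0).foldl (fun new_data rc =>
    (PySem.List.enumerate rc.2.toList 0).foldl (fun new_data cc =>
      if cc.2 = '.' then new_data
      else
        let rows := PySem.List.slice data (some (if 1 ≤ rc.1 then rc.1 - 1 else 0)) (some (rc.1 + 2))
        let window := rows.map (fun row => PySem.Str.slice row (some (if 1 ≤ cc.1 then cc.1 - 1 else 0)) (some (cc.1 + 2)))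
        if PySem.Str.count (PySem.Str.join "" window) "@" < 5 then
          -- new_data[r] is always in range here; pyGetD is the total form of that read
          let cur := PySem.List.pyGetD new_data rc.1 ""
          PySem.List.pySetD new_data rc.1
            (PySem.Str.join "" [PySem.Str.slice cur none (some cc.1), ".", PySem.Str.slice cur (some (cc.1 + 1)) none])
        else new_data) new_data) data

-- ===== PORT B =====
-- itertools.accumulate(…, initial=0) over the 0/1 weights of a row
def pvPref (cs : List Char) : List Int :=
  List.scanl (fun a ch => a + (if ch = '@' then 1 else 0)) 0 cs

def remove_accessible_rolls_alt (data : List String) : List String :=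
  let prefs := data.map (fun row => pvPref row.toList)
  let nRows : Int := data.length
  (PySem.List.enumerate data 0).map (fun rc =>
    let r0 := if 1 ≤ rc.1 then rc.1 - 1 else 0
    let r1 := if rc.1 + 2 < nRows then rc.1 + 2 else nRows
    String.ofList ((PySem.List.enumerate rc.2.toList 0).map (fun cc =>
      if cc.2 = '.' then cc.2
      else
        let c0 := if 1 ≤ cc.1 then cc.1 - 1 else 0
        let c1 := cc.1 + 2
        let cnt := (PySem.List.pyRange r0 r1 1).foldl (fun cnt i =>
          let p := PySem.List.pyGetD prefs i []
          let m : Int := (p.length : Int) - 1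
          cnt + PySem.List.pyGetD p (if c1 < m then c1 else m) 0
              - PySem.List.pyGetD p (if c0 < m then c0 else m) 0) 0
        if cnt < 5 then '.' else cc.2)))

-- ===== PRECONDITION & SPEC =====
def Spec_remove_accessible_rolls (data : List String) (out : List String) : Prop := out = remove_accessible_rolls_alt data
instance (data : List String) (out : List String) : Decidable (Spec_remove_accessible_rolls data out) := by unfold Spec_remove_accessible_rolls; infer_instance

-- ===== CLAIM (what is proved, stated in full; the proofs are below) =====
def Claim_equal_remove_accessible_rolls : Prop := ∀ (data : List String), Dom_remove_accessible_rolls data → Spec_remove_accessible_rolls data (remove_accessible_rolls data)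

-- ===== LEMMAS AND PROOFS =====

theorem count_go_singleton (c : Char) : ∀ (fuel : Nat) (l : List Char) (acc : Nat), l.length ≤ fuel →
    PySem.Chars.count.go [c] fuel l acc = acc + l.count c
  | 0, [], acc, _ => by simp [PySem.Chars.count.go]
  | 0, h :: t, acc, hl => by simp at hl
  | fuel+1, [], acc, _ => by simp [PySem.Chars.count.go]
  | fuel+1, h :: t, acc, hl => by
      rw [PySem.Chars.count.go]
      by_cases hc : c = h
      · subst hc
        simp [List.isPrefixOf, count_go_singleton c fuel t (acc+1) (by simpa using hl)]
        omega
      · simp [List.isPrefixOf, hc, count_go_singleton c fuel t acc (by simpa using hl), Ne.symm hc]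

theorem chars_count_singleton (s : List Char) (c : Char) : PySem.Chars.count s [c] = s.count c := by
  rw [PySem.Chars.count]
  simp [count_go_singleton c s.length s 0 le_rfl]

theorem join_nil_flatten (ps : List (List Char)) : PySem.Chars.join [] ps = ps.flatten := by
  induction ps with
  | nil => simp [PySem.Chars.join_nil]
  | cons p rest ih =>
      cases rest with
      | nil => simp [PySem.Chars.join_singleton]
      | cons q r => simp [PySem.Chars.join_cons_cons, ih]

theorem scanl_getD : ∀ (cs : List Char) (a : Int) (j : Nat), j ≤ cs.length →
    (List.scanl (fun x ch => x + (if ch = '@' then 1 else 0)) a cs).getD j 0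
      = a + ((cs.take j).count '@' : Int)
  | cs, a, 0, _ => by cases cs <;> simp
  | [], a, j+1, hj => by simp at hj
  | ch :: cs, a, j+1, hj => by
      rw [List.scanl_cons]
      have : ∀ (l : List Int) (x : Int), (x :: l).getD (j+1) 0 = l.getD j 0 := by intro l x; rfl
      rw [this, scanl_getD cs _ j (by simpa using hj)]
      by_cases h : ch = '@' <;> simp [h, List.count_cons] <;> push_cast <;> ring

theorem pvPref_getD (cs : List Char) (j : Nat) (hj : j ≤ cs.length) :
    (pvPref cs).getD j 0 = ((cs.take j).count '@' : Int) := by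
  simpa using scanl_getD cs 0 j hj

theorem pvPref_length (cs : List Char) : (pvPref cs).length = cs.length + 1 := by
  simp [pvPref]

theorem sum_pyRange {α : Type} (ps : List α) (d : α) (g : α → Int) (a b : Nat) (hb : b ≤ ps.length) :
    ((PySem.List.pyRange (a:Int) (b:Int) 1).map (fun i => g (PySem.List.pyGetD ps i d))).sum
      = (((ps.drop a).take (b - a)).map g).sum := by
  apply congrArg List.sum
  rw [PySem.List.pyRange_one, List.map_map]
  apply List.ext_getElem
  · simp; omega
  · intro k h1 h2
    have hk : k < b - a := by simp at h1; omega
    simp only [Function.comp, List.getElem_map, List.getElem_range, List.getElem_take,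
      List.getElem_drop]
    rw [PySem.List.pyGetD_eq_getElem _ _ (by positivity) (by push_cast; omega)]
    congr 1

theorem pref_diff (cs : List Char) (cn : Nat) :
    PySem.List.pyGetD (pvPref cs) (if (cn:Int)+2 < (((pvPref cs).length:Int) - 1) then (cn:Int)+2 else (((pvPref cs).length:Int) - 1)) 0
      - PySem.List.pyGetD (pvPref cs) (if (if 1 ≤ (cn:Int) then (cn:Int)-1 else 0) < (((pvPref cs).length:Int) - 1) then (if 1 ≤ (cn:Int) then (cn:Int)-1 else 0) else (((pvPref cs).length:Int) - 1)) 0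
      = (List.count '@' (PySem.List.slice cs (some (if 1 ≤ (cn:Int) then (cn:Int)-1 else 0)) (some ((cn:Int)+2))) : Int) := by
  have hlen := pvPref_length cs
  have h1 : (if (cn:Int)+2 < (((pvPref cs).length:Int) - 1) then (cn:Int)+2 else (((pvPref cs).length:Int) - 1)) = ((min (cn+2) cs.length : Nat) : Int) := by
    rw [hlen]; split <;> push_cast <;> omega
  have h0' : (if 1 ≤ (cn:Int) then (cn:Int)-1 else 0) = ((cn - 1 : Nat) : Int) := by
    split <;> push_cast <;> omega
  have h0 : (if ((cn - 1 : Nat) : Int) < (((pvPref cs).length:Int) - 1) then ((cn - 1 : Nat) : Int) else (((pvPref cs).length:Int) - 1)) = ((min (cn-1) cs.length : Nat) : Int) := by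
    rw [hlen]; split <;> push_cast <;> omega
  rw [h0', h1, h0, PySem.List.pyGetD_natCast, PySem.List.pyGetD_natCast,
    pvPref_getD cs _ (by omega), pvPref_getD cs _ (by omega)]
  rw [PySem.List.slice_toNat cs (by positivity) (by positivity)]
  have ht1 : List.take (min (cn+2) cs.length) cs = List.take (cn+2) cs := by
    rcases le_total (cn+2) cs.length with h | h
    · rw [min_eq_left h]
    · rw [min_eq_right h, List.take_of_length_le h, List.take_of_length_le (by omega)]
  have ht0 : List.take (min (cn-1) cs.length) cs = List.take (cn-1) cs := by
    rcases le_total (cn-1) cs.length with h | h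
    · rw [min_eq_left h]
    · rw [min_eq_right h, List.take_of_length_le h, List.take_of_length_le (by omega)]
  rw [ht1, ht0]
  have hsplit : List.take (cn+2) cs = List.take (cn-1) cs ++ List.take ((cn+2)-(cn-1)) (List.drop (cn-1) cs) := by
    rw [← List.take_add]; congr 1; omega
  rw [hsplit, List.count_append]
  have : ((cn:Int)+2).toNat - ((cn-1:Nat):Int).toNat = (cn+2)-(cn-1) := by omega
  rw [this]
  simp

def pvCntA (data : List String) (r c : Int) : Nat :=
  PySem.Str.count (PySem.Str.join ""
    ((PySem.List.slice data (some (if 1 ≤ r then r - 1 else 0)) (some (r + 2))).map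
      (fun row => PySem.Str.slice row (some (if 1 ≤ c then c - 1 else 0)) (some (c + 2))))) "@"

def pvCntB (data : List String) (r c : Int) : Int :=
  (PySem.List.pyRange (if 1 ≤ r then r - 1 else 0)
      (if r + 2 < (data.length : Int) then r + 2 else (data.length : Int)) 1).foldl
    (fun cnt i =>
      let p := PySem.List.pyGetD (data.map (fun row => pvPref row.toList)) i []
      let m : Int := (p.length : Int) - 1
      cnt + PySem.List.pyGetD p (if c + 2 < m then c + 2 else m) 0
          - PySem.List.pyGetD p (if (if 1 ≤ c then c - 1 else 0) < m then (if 1 ≤ c then c - 1 else 0) else m) 0) 0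

theorem cnt_eq (data : List String) (rn cn : Nat) (hr : rn < data.length) :
    pvCntB data (rn:Int) (cn:Int) = (pvCntA data (rn:Int) (cn:Int) : Int) := by
  unfold pvCntB pvCntA
  have hg : (fun (cnt : Int) (i : Int) =>
      let p := PySem.List.pyGetD (data.map (fun row => pvPref row.toList)) i []
      let m : Int := (p.length : Int) - 1
      cnt + PySem.List.pyGetD p (if (cn:Int) + 2 < m then (cn:Int) + 2 else m) 0
          - PySem.List.pyGetD p (if (if 1 ≤ (cn:Int) then (cn:Int) - 1 else 0) < m then (if 1 ≤ (cn:Int) then (cn:Int) - 1 else 0) else m) 0)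
      = (fun (cnt : Int) (i : Int) => cnt +
          (fun p => PySem.List.pyGetD p (if (cn:Int) + 2 < ((p.length:Int)-1) then (cn:Int) + 2 else ((p.length:Int)-1)) 0
          - PySem.List.pyGetD p (if (if 1 ≤ (cn:Int) then (cn:Int) - 1 else 0) < ((p.length:Int)-1) then (if 1 ≤ (cn:Int) then (cn:Int) - 1 else 0) else ((p.length:Int)-1)) 0)
            (PySem.List.pyGetD (data.map (fun row => pvPref row.toList)) i [])) := by
    funext cnt i; simp only []; ring
  rw [hg, PySem.List.foldl_add, zero_add]
  have hr0 : (if 1 ≤ (rn:Int) then (rn:Int) - 1 else 0) = ((rn - 1 : Nat) : Int) := by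
    split <;> push_cast <;> omega
  have hr1 : (if (rn:Int) + 2 < (data.length : Int) then (rn:Int) + 2 else (data.length : Int))
      = ((min (rn + 2) data.length : Nat) : Int) := by
    split <;> push_cast <;> omega
  rw [hr0, hr1]
  beta_reduce
  rw [sum_pyRange (data.map fun row => pvPref row.toList) []
      (fun p => PySem.List.pyGetD p (if (cn:Int) + 2 < ((p.length:Int)-1) then (cn:Int) + 2 else ((p.length:Int)-1)) 0
          - PySem.List.pyGetD p (if (if 1 ≤ (cn:Int) then (cn:Int) - 1 else 0) < ((p.length:Int)-1) then (if 1 ≤ (cn:Int) then (cn:Int) - 1 else 0) else ((p.length:Int)-1)) 0)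
      (rn - 1) (min (rn + 2) data.length) (by simp)]
  rw [← List.map_drop, ← List.map_take, List.map_map]
  -- A side
  rw [PySem.Str.count_eq, PySem.Str.toList_join]
  have hsep : ("" : String).toList = [] := rfl
  have hat : ("@" : String).toList = ['@'] := rfl
  rw [hsep, hat, join_nil_flatten, chars_count_singleton, List.count_flatten]
  rw [List.map_map, List.map_map]
  rw [PySem.List.slice_toNat data (by positivity) (by positivity)]
  have hidx : ((rn:Int) + 2).toNat - (((rn - 1 : Nat) : Int)).toNat = (rn + 2) - (rn - 1) := by omega
  rw [hidx]
  have htake : ∀ {α : Type} (l : List α), l.length = data.length →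
      List.take (min (rn + 2) data.length - (rn - 1)) (List.drop (rn - 1) l)
      = List.take ((rn + 2) - (rn - 1)) (List.drop (rn - 1) l) := by
    intro α l hl
    rcases le_total (rn + 2) data.length with h | h
    · rw [min_eq_left h]
    · rw [min_eq_right h, List.take_of_length_le (by rw [List.length_drop]; omega),
        List.take_of_length_le (by rw [List.length_drop]; omega)]
  simp only [Int.toNat_natCast]
  rw [htake data rfl]
  push_cast
  apply congrArg List.sum
  rw [List.map_map]
  apply List.map_congr_left
  intro row _
  simp only [Function.comp]
  rw [pref_diff row.toList cn]
  congr 1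
  rw [PySem.Str.toList_slice]
  simp

def pvFA (data : List String) (r c : Int) (ch : Char) : Char :=
  if ch = '.' then ch else if pvCntA data r c < 5 then '.' else ch

def pvStepA (data : List String) (r : Int) (new_data : List String) (cc : Int × Char) : List String :=
  if cc.2 = '.' then new_data
  else
    let rows := PySem.List.slice data (some (if 1 ≤ r then r - 1 else 0)) (some (r + 2))
    let window := rows.map (fun row => PySem.Str.slice row (some (if 1 ≤ cc.1 then cc.1 - 1 else 0)) (some (cc.1 + 2)))
    if PySem.Str.count (PySem.Str.join "" window) "@" < 5 then
      let cur := PySem.List.pyGetD new_data r ""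
      PySem.List.pySetD new_data r
        (PySem.Str.join "" [PySem.Str.slice cur none (some cc.1), ".", PySem.Str.slice cur (some (cc.1 + 1)) none])
    else new_data

theorem str_eq_of_toList {s t : String} (h : s.toList = t.toList) : s = t := by
  rw [← String.ofList_toList (s := s), h, String.ofList_toList]

theorem step_once (data : List String) (rn : Nat) (u v' : List Char) (ch : Char) (nd : List String)
    (hrn : rn < nd.length) (hnd : (nd.getD rn "").toList = u ++ ch :: v') :
    pvStepA data (rn : Int) nd ((u.length : Int), ch)
      = nd.set rn (String.ofList (u ++ pvFA data (rn : Int) (u.length : Int) ch :: v')) := by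
  have hget : nd.getD rn "" = nd[rn] := List.getD_eq_getElem nd "" hrn
  have hofl : String.ofList (u ++ ch :: v') = nd[rn] := by
    rw [← hnd, hget, String.ofList_toList]
  simp only [pvStepA, pvFA]
  by_cases h1 : ch = '.'
  · subst h1
    rw [if_pos rfl, if_pos rfl, hofl, List.set_getElem_self]
  · simp only [if_neg h1]
    have hcnt : (PySem.Str.count (PySem.Str.join ""
        ((PySem.List.slice data (some (if 1 ≤ (rn:Int) then (rn:Int) - 1 else 0)) (some ((rn:Int) + 2))).map
          (fun row => PySem.Str.slice row (some (if 1 ≤ (u.length:Int) then (u.length:Int) - 1 else 0)) (some ((u.length:Int) + 2))))) "@")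
        = pvCntA data (rn:Int) (u.length:Int) := rfl
    rw [hcnt]
    by_cases h2 : pvCntA data (rn:Int) (u.length:Int) < 5
    · rw [if_pos h2, if_pos h2]
      rw [PySem.List.pyGetD_natCast, PySem.List.pySetD_natCast, hget]
      have hcur : (nd[rn]).toList = u ++ ch :: v' := by rw [← hget]; exact hnd
      have hstr : ∀ (s : String), s.toList = u ++ ch :: v' →
          (PySem.Str.join "" [PySem.Str.slice s none (some (u.length:Int)), ".",
            PySem.Str.slice s (some ((u.length:Int) + 1)) none])
          = String.ofList (u ++ '.' :: v') := by
        intro s hs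
        apply str_eq_of_toList
        rw [PySem.Str.toList_join]
        simp only [List.map_cons, List.map_nil]
        rw [show ("" : String).toList = [] from rfl, PySem.Chars.join_cons_cons,
          PySem.Chars.join_cons_cons, PySem.Chars.join_singleton]
        have ht : (PySem.Str.slice s none (some (u.length : Int))).toList = u := by
          rw [PySem.Str.toList_slice, PySem.Chars.slice_eq_listSlice, hs,
            PySem.List.slice_to_natCast]
          simpa using List.take_left (l₁ := u) (l₂ := ch :: v')
        have hd : (PySem.Str.slice s (some ((u.length : Int) + 1)) none).toList = v' := by
          rw [PySem.Str.toList_slice, PySem.Chars.slice_eq_listSlice, hs]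
          rw [show ((u.length : Int) + 1) = ((u.length + 1 : Nat) : Int) by push_cast; ring,
            PySem.List.slice_from_natCast]
          rw [show u ++ ch :: v' = (u ++ [ch]) ++ v' by simp]
          exact List.drop_left' (by simp)
        rw [ht, hd]
        simp [String.toList_ofList]
      rw [hstr _ hcur]
    · rw [if_neg h2, if_neg h2, hofl, List.set_getElem_self]

def pvRow (data : List String) (rn : Nat) : Nat → List Char → List Char
  | _, [] => []
  | k, ch :: v' => pvFA data (rn : Int) (k : Int) ch :: pvRow data rn (k+1) v'

def pvGrid (data : List String) : Nat → List String → List String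
  | _, [] => []
  | k, row :: rest => String.ofList (pvRow data k 0 row.toList) :: pvGrid data (k+1) rest

theorem innerA (data : List String) (rn : Nat) (v : List Char) : ∀ (u : List Char) (nd : List String),
    rn < nd.length → (nd.getD rn "").toList = u ++ v →
    (PySem.List.enumerate v (u.length : Int)).foldl (pvStepA data (rn : Int)) nd
      = nd.set rn (String.ofList (u ++ pvRow data rn u.length v)) := by
  induction v with
  | nil =>
      intro u nd hrn hnd
      simp only [PySem.List.enumerate, List.foldl_nil, pvRow, List.append_nil]
      rw [List.append_nil] at hnd
      rw [← hnd, List.getD_eq_getElem nd "" hrn, String.ofList_toList, List.set_getElem_self]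
  | cons ch v' ih =>
      intro u nd hrn hnd
      rw [PySem.List.enumerate_cons, List.foldl_cons, step_once data rn u v' ch nd hrn hnd]
      have hrn' : rn < (nd.set rn (String.ofList (u ++ pvFA data (rn:Int) (u.length:Int) ch :: v'))).length := by
        simpa using hrn
      have hnd' : ((nd.set rn (String.ofList (u ++ pvFA data (rn:Int) (u.length:Int) ch :: v'))).getD rn "").toList
          = (u ++ [pvFA data (rn:Int) (u.length:Int) ch]) ++ v' := by
        rw [List.getD_eq_getElem _ "" hrn', List.getElem_set_self, String.toList_ofList]
        simp
      rw [show ((u.length : Int) + 1) = (((u ++ [pvFA data (rn:Int) (u.length:Int) ch]).length : Nat) : Int) by simp]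
      rw [ih (u ++ [pvFA data (rn:Int) (u.length:Int) ch]) _ hrn' hnd']
      rw [List.set_set]
      simp [pvRow]

theorem outerA (data : List String) (suffix : List String) : ∀ (done : List String),
    (PySem.List.enumerate suffix ((done.length : Nat) : Int)).foldl
        (fun nd rc => (PySem.List.enumerate rc.2.toList 0).foldl (pvStepA data rc.1) nd) (done ++ suffix)
      = done ++ pvGrid data done.length suffix := by
  induction suffix with
  | nil => intro done; simp [PySem.List.enumerate, pvGrid]
  | cons row rest ih =>
      intro done
      rw [PySem.List.enumerate_cons, List.foldl_cons]
      have h1 : done.length < (done ++ row :: rest).length := by simp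
      have h2 : ((done ++ row :: rest).getD done.length "").toList = [] ++ row.toList := by
        rw [List.getD_eq_getElem _ "" h1, List.getElem_append_right (le_refl done.length)]
        simp
      have hfirst := innerA data done.length row.toList [] (done ++ row :: rest) h1 h2
      simp only [List.length_nil, Nat.cast_zero] at hfirst
      rw [hfirst]
      have hset : (done ++ row :: rest).set done.length (String.ofList ([] ++ pvRow data done.length 0 row.toList))
          = (done ++ [String.ofList (pvRow data done.length 0 row.toList)]) ++ rest := by
        rw [List.set_append]
        simp
      rw [hset]
      rw [show ((done.length : Int) + 1) = (((done ++ [String.ofList (pvRow data done.length 0 row.toList)]).length : Nat) : Int) by simp]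
      rw [ih (done ++ [String.ofList (pvRow data done.length 0 row.toList)])]
      simp [pvGrid]

theorem portA_grid (data : List String) : remove_accessible_rolls data = pvGrid data 0 data := by
  have h := outerA data data []
  simp only [List.nil_append, List.length_nil, Nat.cast_zero] at h
  exact h

theorem rowB (data : List String) (rn : Nat) (hrn : rn < data.length) (v : List Char) : ∀ (cn : Nat),
    pvRow data rn cn v = (PySem.List.enumerate v (cn : Int)).map (fun cc =>
      if cc.2 = '.' then cc.2 else if pvCntB data (rn:Int) cc.1 < 5 then '.' else cc.2) := by
  induction v with
  | nil => intro _; simp [pvRow, PySem.List.enumerate]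
  | cons ch v' ih =>
      intro cn
      rw [PySem.List.enumerate_cons, List.map_cons,
        show ((cn:Int) + 1) = ((cn + 1 : Nat) : Int) by push_cast; ring, ← ih (cn+1)]
      simp only [pvRow]
      have hhead : pvFA data (rn:Int) (cn:Int) ch
          = (if ch = '.' then ch else if pvCntB data (rn:Int) (cn:Int) < 5 then '.' else ch) := by
        unfold pvFA
        by_cases h1 : ch = '.'
        · simp [h1]
        · rw [if_neg h1, if_neg h1, cnt_eq data rn cn hrn]
          by_cases h2 : pvCntA data (rn:Int) (cn:Int) < 5
          · rw [if_pos h2, if_pos (by exact_mod_cast h2)]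
          · rw [if_neg h2, if_neg (by exact_mod_cast h2)]
      rw [hhead]

theorem gridB (data : List String) (suffix : List String) : ∀ (k : Nat), k + suffix.length ≤ data.length →
    pvGrid data k suffix = (PySem.List.enumerate suffix ((k : Nat) : Int)).map (fun rc =>
      String.ofList ((PySem.List.enumerate rc.2.toList 0).map (fun cc =>
        if cc.2 = '.' then cc.2 else if pvCntB data rc.1 cc.1 < 5 then '.' else cc.2))) := by
  induction suffix with
  | nil => intro _ _; simp [pvGrid, PySem.List.enumerate]
  | cons row rest ih =>
      intro k hk
      rw [PySem.List.enumerate_cons, List.map_cons]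
      simp only [pvGrid]
      rw [show ((k:Int) + 1) = ((k + 1 : Nat) : Int) by push_cast; ring,
        ← ih (k+1) (by simp at hk ⊢; omega)]
      congr 1
      rw [rowB data k (by simp at hk; omega) row.toList 0]
      simp

theorem ports_agree (data : List String) : remove_accessible_rolls data = remove_accessible_rolls_alt data := by
  rw [portA_grid, gridB data data 0 (by simp)]
  simp only [Nat.cast_zero]
  rfl

-- ===== VERDICT (by name: the statement is the Claim_ definition above) =====
theorem remove_accessible_rolls_spec : Claim_equal_remove_accessible_rolls := by
  intro data _
  exact (ports_agree data)
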